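-- pv_equiv track=rewrite | github.com/asa-jg/ML | COMP0080/Testing grounds.py | bestShift
-- ===== SOURCE A (Python) =====
-- from string import ascii_letters
--
-- chrs = ascii_letters + " " + "0123456789"
--
-- def valid(val):
--     """
--     iv?
--     """
--     if chr(val) in chrs:
--         return True
--     return False
--
-- def bestShift(values):
--     """
--     bsv
--     """
--     bestShift = 0
--     bestScore = -1
--     for sc in range(256):
--         score = 0
--         for v in values:
--             pt = (v - sc) % 256
--             if valid(pt):
--                 score += 1
--         if score > bestScore:
--             bestScore = score
--             bestShift = sc
--     return bestShift, bestScore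
-- ===== SOURCE B (Python) =====
-- from string import ascii_letters
--
-- chrs = ascii_letters + " " + "0123456789"
--
-- def bestShift(values):
--     # Histogram the byte residues once, then scatter each valid character's
--     # contribution onto the unique shift that decodes to it; finally argmax.
--     hist = [0] * 256
--     for v in values:
--         hist[v % 256] += 1
--     scores = [0] * 256
--     for c in chrs:
--         oc = ord(c)
--         for b in range(256):
--             scores[(b - oc) % 256] += hist[b]
--     best = 0
--     for sc in range(1, 256):
--         if scores[sc] > scores[best]:
--             best = sc
--     return best, scores[best]
-- ===== Notes on version B (the rewrite author's own statement) =====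
-- stated objective: faster
-- what changed: B builds a 256-bucket byte-residue histogram once, then for each valid character scatters its histogram contribution onto the unique shift that decodes to it (no per-shift validity test at all), and finally takes the argmax of the 256 precomputed scores; A rescans the whole value list for each of the 256 shifts.
import Mathlib
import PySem

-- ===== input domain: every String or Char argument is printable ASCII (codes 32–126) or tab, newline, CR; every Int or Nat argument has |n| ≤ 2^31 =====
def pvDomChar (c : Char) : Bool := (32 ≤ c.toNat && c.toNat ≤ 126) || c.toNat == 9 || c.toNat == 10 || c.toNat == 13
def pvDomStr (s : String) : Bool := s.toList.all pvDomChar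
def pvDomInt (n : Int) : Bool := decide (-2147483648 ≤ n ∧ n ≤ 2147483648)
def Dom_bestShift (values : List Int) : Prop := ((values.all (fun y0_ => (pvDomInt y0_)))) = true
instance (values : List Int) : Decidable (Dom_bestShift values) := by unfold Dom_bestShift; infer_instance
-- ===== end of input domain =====

-- B replaces A's per-shift rescan of all values by a byte-residue histogram plus a scatter of each
-- valid character's contribution onto the unique shift decoding to it: O(256·n) → O(n + 256·63).
-- Python's fixed-size integer lists hist/scores are ported as index-keyed finite maps
-- PySem.Dict Int Int ('hist[i] += x' = insert i (getD i 0 + x)); all loops, their order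
-- and bodies are kept.

set_option maxRecDepth 10000

-- ===== PORT A =====
-- chrs = ascii_letters + " " + "0123456789"
def pyChrs : List Char :=
  "abcdefghijklmnopqrstuvwxyzABCDEFGHIJKLMNOPQRSTUVWXYZ 0123456789".toList

-- valid(val): chr(val) in chrs.  'chr' ported via Char.ofNat val.toNat — exact here, since
-- every call site passes a '% 256' result, i.e. 0 ≤ val < 256 (within chr's domain).
def pyValid (val : Int) : Bool := pyChrs.contains (Char.ofNat val.toNat)

-- the inner 'for v in values' loop of A, for one shift sc
def scoreA (values : List Int) (sc : Int) : Int :=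
  values.foldl (fun score v => if pyValid (PySem.Int.mod (v - sc) 256) then score + 1 else score) 0

def bestShift (values : List Int) : Int × Int :=
  (PySem.List.pyRange 0 256 1).foldl
    (fun st sc =>
      let score := scoreA values sc
      if score > st.2 then (sc, score) else st)
    (0, -1)

-- ===== PORT B =====
-- [ord(c) for c in chrs]
def bOrds : List Int := pyChrs.map (fun c => (c.toNat : Int))

-- hist = [0]*256; for v in values: hist[v % 256] += 1
def histB (values : List Int) : PySem.Dict Int Int :=
  values.foldl
    (fun h v => h.insert (PySem.Int.mod v 256) (h.getD (PySem.Int.mod v 256) 0 + 1))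
    PySem.Dict.empty

-- scores = [0]*256; for c in chrs: for b in range(256): scores[(b - ord(c)) % 256] += hist[b]
def scoresB (hist : PySem.Dict Int Int) : PySem.Dict Int Int :=
  bOrds.foldl
    (fun s oc =>
      (PySem.List.pyRange 0 256 1).foldl
        (fun s b =>
          s.insert (PySem.Int.mod (b - oc) 256) (s.getD (PySem.Int.mod (b - oc) 256) 0 + hist.getD b 0))
        s)
    PySem.Dict.empty

def bestShift_alt (values : List Int) : Int × Int :=
  let scores := scoresB (histB values)
  let best := (PySem.List.pyRange 1 256 1).foldl
    (fun best sc => if scores.getD sc 0 > scores.getD best 0 then sc else best) 0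
  (best, scores.getD best 0)

-- ===== PRECONDITION & SPEC =====
def Spec_bestShift (values : List Int) (out : Int × Int) : Prop := out = bestShift_alt values
instance (values : List Int) (out : Int × Int) : Decidable (Spec_bestShift values out) := by unfold Spec_bestShift; infer_instance

-- ===== CLAIM (what is proved, stated in full; the proofs are below) =====
def Claim_equal_bestShift : Prop := ∀ (values : List Int), Dom_bestShift values → Spec_bestShift values (bestShift values)

-- ===== LEMMAS AND PROOFS =====

-- PySem.Int.mod by the positive literal 256 is emod
lemma mod256 (a : Int) : PySem.Int.mod a 256 = a % 256 :=
  PySem.Int.mod_eq_emod_of_pos (by norm_num)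

-- an update-accumulate loop read at one key is the sum of the matching contributions
lemma foldl_insert_add {α : Type} (l : List α) (idx g : α → Int) (d0 : PySem.Dict Int Int) (t : Int) :
    (l.foldl (fun d x => d.insert (idx x) (d.getD (idx x) 0 + g x)) d0).getD t 0
      = d0.getD t 0 + (l.map (fun x => if idx x = t then g x else 0)).sum := by
  induction l generalizing d0 with
  | nil => simp
  | cons x l ih =>
    simp only [List.foldl_cons, List.map_cons, List.sum_cons, ih,
      PySem.Dict.getD_insert]
    by_cases h : idx x = t
    · subst h; simp; ring
    · have h' : ¬ t = idx x := fun e => h e.symm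
      simp [h, h']

-- indicator sum over a nodup list containing v
lemma sum_indicator_of_nodup (L : List Int) (v : Int) (c : Int)
    (hnd : L.Nodup) (hv : v ∈ L) :
    (L.map (fun b => if b = v then c else 0)).sum = c := by
  induction L with
  | nil => cases hv
  | cons a L ih =>
    rcases List.nodup_cons.mp hnd with ⟨ha, hnd'⟩
    by_cases h : a = v
    · subst h
      have hz : (L.map (fun b => if b = a then c else 0)).sum = 0 := by
        apply List.sum_eq_zero
        intro x hx
        rcases List.mem_map.mp hx with ⟨b, hb, rfl⟩
        have : ¬ b = a := fun e => ha (e ▸ hb)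
        rw [if_neg this]
      rw [List.map_cons, List.sum_cons, if_pos rfl, hz, add_zero]
    · have hv' : v ∈ L := by
        rcases List.mem_cons.mp hv with h' | h'
        · exact absurd h'.symm h
        · exact h'
      rw [List.map_cons, List.sum_cons, if_neg h, ih hnd' hv', zero_add]

-- double sums over lists commute
lemma sum_map_swap {α β : Type} (l : List α) (m : List β) (f : α → β → Int) :
    (l.map (fun x => (m.map (f x)).sum)).sum
      = (m.map (fun y => (l.map (fun x => f x y)).sum)).sum := by
  induction l with
  | nil => simp [List.sum_eq_zero]
  | cons x l ih =>
    simp only [List.map_cons, List.sum_cons, ih, ← List.sum_map_add]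

-- pyValid on a byte value is membership in bOrds
lemma pyValid_eq_mem (x : Int) (h0 : 0 ≤ x) (h1 : x < 256) :
    pyValid x = true ↔ x ∈ bOrds := by
  have key : ∀ n : Fin 256, (pyValid ((n : Nat) : Int) = true ↔ ((n : Nat) : Int) ∈ bOrds) := by
    decide
  have hx : x = ((x.toNat : Nat) : Int) := by omega
  have hlt : x.toNat < 256 := by omega
  have := key ⟨x.toNat, hlt⟩
  rw [hx]; exact this

-- scoreA as a 0/1 indicator sum
lemma scoreA_eq_sum (values : List Int) (t : Int) :
    scoreA values t
      = (values.map (fun v => if pyValid ((v - t) % 256) then (1 : Int) else 0)).sum := by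
  unfold scoreA
  simp only [mod256]
  rw [PySem.List.foldl_if_add_one, PySem.List.sum_map_ite_one_zero]
  simp

lemma scoreA_nonneg (values : List Int) (t : Int) : 0 ≤ scoreA values t := by
  unfold scoreA
  rw [PySem.List.foldl_if_add_one]
  positivity

-- the histogram read at one byte counts the values with that residue
lemma histB_eq (values : List Int) (y : Int) :
    (histB values).getD y 0
      = (values.map (fun v => if v % 256 = y then (1 : Int) else 0)).sum := by
  unfold histB
  simp only [mod256]
  rw [foldl_insert_add values (fun v => v % 256) (fun _ => 1) PySem.Dict.empty y]
  simp

-- the inner range-scatter for one character collapses to a single histogram read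
lemma inner_collapse (hist : PySem.Dict Int Int) (oc t : Int) (h0 : 0 ≤ t) (h1 : t < 256) :
    ((PySem.List.pyRange 0 256 1).map
        (fun b => if (b - oc) % 256 = t then hist.getD b 0 else 0)).sum
      = hist.getD ((t + oc) % 256) 0 := by
  have hw0 : 0 ≤ (t + oc) % 256 := by omega
  have hw1 : (t + oc) % 256 < 256 := by omega
  have hcongr : ∀ b ∈ PySem.List.pyRange 0 256 1,
      (if (b - oc) % 256 = t then hist.getD b 0 else 0)
        = (if b = (t + oc) % 256 then hist.getD ((t + oc) % 256) 0 else 0) := by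
    intro b hb
    have hb' := (PySem.List.mem_pyRange_one).mp hb
    by_cases h : b = (t + oc) % 256
    · subst h
      have : ((t + oc) % 256 - oc) % 256 = t := by omega
      simp [this]
    · have : ¬ (b - oc) % 256 = t := by omega
      simp [h, this]
  rw [List.map_congr_left hcongr]
  exact sum_indicator_of_nodup _ _ _ (PySem.List.nodup_pyRange_one 0 256)
    ((PySem.List.mem_pyRange_one).mpr ⟨hw0, hw1⟩)

-- the whole scatter loop read at shift t
lemma scoresB_eq (hist : PySem.Dict Int Int) (t : Int) (h0 : 0 ≤ t) (h1 : t < 256) :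
    (scoresB hist).getD t 0 = (bOrds.map (fun oc => hist.getD ((t + oc) % 256) 0)).sum := by
  unfold scoresB
  have outer : ∀ (l : List Int) (s : PySem.Dict Int Int),
      ((l.foldl
        (fun s oc =>
          (PySem.List.pyRange 0 256 1).foldl
            (fun s b =>
              s.insert (PySem.Int.mod (b - oc) 256) (s.getD (PySem.Int.mod (b - oc) 256) 0 + hist.getD b 0))
            s)
        s).getD t 0)
      = s.getD t 0 + (l.map (fun oc => hist.getD ((t + oc) % 256) 0)).sum := by
    intro l
    induction l with
    | nil => simp
    | cons oc l ih =>
      intro s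
      simp only [List.foldl_cons, List.map_cons, List.sum_cons, ih]
      have : ((PySem.List.pyRange 0 256 1).foldl
          (fun s b =>
            s.insert (PySem.Int.mod (b - oc) 256) (s.getD (PySem.Int.mod (b - oc) 256) 0 + hist.getD b 0))
          s).getD t 0 = s.getD t 0 + hist.getD ((t + oc) % 256) 0 := by
        simp only [mod256]
        rw [foldl_insert_add _ (fun b => (b - oc) % 256) (fun b => hist.getD b 0) s t,
            inner_collapse hist oc t h0 h1]
      rw [this]; ring
  rw [outer bOrds PySem.Dict.empty]; simp

-- every character code in bOrds is a byte, and bOrds is duplicate-free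
lemma bOrds_bounds : ∀ oc ∈ bOrds, 0 ≤ oc ∧ oc < 256 := by decide
lemma bOrds_nodup : bOrds.Nodup := by decide

-- per value: summing the residue match over the character codes is the validity indicator
lemma per_value (v t : Int) :
    (bOrds.map (fun oc => if v % 256 = (t + oc) % 256 then (1 : Int) else 0)).sum
      = if pyValid ((v - t) % 256) then (1 : Int) else 0 := by
  have hw0 : 0 ≤ (v - t) % 256 := by omega
  have hw1 : (v - t) % 256 < 256 := by omega
  have hcongr : ∀ oc ∈ bOrds,
      (if v % 256 = (t + oc) % 256 then (1 : Int) else 0)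
        = (if oc = (v - t) % 256 then (1 : Int) else 0) := by
    intro oc hoc
    rcases bOrds_bounds oc hoc with ⟨hl, hr⟩
    by_cases h : oc = (v - t) % 256
    · subst h
      have : v % 256 = (t + (v - t) % 256) % 256 := by omega
      rw [if_pos this, if_pos rfl]
    · have : ¬ v % 256 = (t + oc) % 256 := by omega
      rw [if_neg this, if_neg h]
  rw [List.map_congr_left hcongr]
  by_cases hmem : (v - t) % 256 ∈ bOrds
  · rw [sum_indicator_of_nodup _ _ _ bOrds_nodup hmem,
        if_pos ((pyValid_eq_mem _ hw0 hw1).mpr hmem)]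
  · have hval : ¬ pyValid ((v - t) % 256) = true := fun h =>
      hmem ((pyValid_eq_mem _ hw0 hw1).mp h)
    rw [if_neg hval]
    apply List.sum_eq_zero
    intro x hx
    rcases List.mem_map.mp hx with ⟨oc, hoc, rfl⟩
    have : ¬ oc = (v - t) % 256 := fun e => hmem (e ▸ hoc)
    rw [if_neg this]

-- the two per-shift scores agree on every shift in [0, 256)
lemma score_eq (values : List Int) (t : Int) (h0 : 0 ≤ t) (h1 : t < 256) :
    (scoresB (histB values)).getD t 0 = scoreA values t := by
  rw [scoresB_eq _ t h0 h1]
  have h1' : ∀ oc ∈ bOrds, (histB values).getD ((t + oc) % 256) 0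
      = (values.map (fun v => if v % 256 = (t + oc) % 256 then (1 : Int) else 0)).sum := by
    intro oc _; exact histB_eq values _
  rw [List.map_congr_left h1',
      sum_map_swap bOrds values (fun oc v => if v % 256 = (t + oc) % 256 then (1 : Int) else 0)]
  rw [scoreA_eq_sum]
  congr 1
  exact List.map_congr_left (fun v _ => per_value v t)

-- A's running (shift, score) pair is the running argmax paired with its score
lemma fold_pair (g : Int → Int) (l : List Int) (b0 : Int) :
    l.foldl (fun (st : Int × Int) sc =>
        if g sc > st.2 then (sc, g sc) else st) (b0, g b0)
      = (l.foldl (fun best sc => if g sc > g best then sc else best) b0,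
         g (l.foldl (fun best sc => if g sc > g best then sc else best) b0)) := by
  induction l generalizing b0 with
  | nil => simp
  | cons sc l ih =>
    simp only [List.foldl_cons]
    by_cases h : g sc > g b0 <;> simp [h, ih]

-- the running argmax stays among the start value and the scanned shifts
lemma fold_best_mem (g : Int → Int) :
    ∀ (l : List Int) (b0 : Int),
      l.foldl (fun best sc => if g sc > g best then sc else best) b0 = b0
        ∨ l.foldl (fun best sc => if g sc > g best then sc else best) b0 ∈ l := by
  intro l
  induction l with
  | nil => intro b0; left; rfl
  | cons sc l ih =>
    intro b0
    simp only [List.foldl_cons]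
    by_cases h : g sc > g b0
    · rw [if_pos h]
      rcases ih sc with h' | h'
      · right; rw [h']; exact List.mem_cons_self ..
      · right; exact List.mem_cons_of_mem _ h'
    · rw [if_neg h]
      rcases ih b0 with h' | h'
      · left; exact h'
      · right; exact List.mem_cons_of_mem _ h'

-- two score functions that agree on [0, 256) drive the argmax fold identically
lemma fold_congr (g h : Int → Int) (heq : ∀ x, 0 ≤ x → x < 256 → g x = h x) :
    ∀ (l : List Int) (b0 : Int), (∀ x ∈ l, 0 ≤ x ∧ x < 256) → 0 ≤ b0 → b0 < 256 →
      l.foldl (fun best sc => if g sc > g best then sc else best) b0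
        = l.foldl (fun best sc => if h sc > h best then sc else best) b0 := by
  intro l
  induction l with
  | nil => intro b0 _ _ _; rfl
  | cons sc l ih =>
    intro b0 hmem hb0 hb1
    rcases hmem sc (List.mem_cons_self ..) with ⟨hs0, hs1⟩
    have hmem' : ∀ x ∈ l, 0 ≤ x ∧ x < 256 := fun x hx => hmem x (List.mem_cons_of_mem _ hx)
    simp only [List.foldl_cons, heq sc hs0 hs1, heq b0 hb0 hb1]
    by_cases hc : h sc > h b0
    · rw [if_pos hc]; exact ih sc hmem' hs0 hs1
    · rw [if_neg hc]; exact ih b0 hmem' hb0 hb1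

-- bestShift_alt with its lets unfolded (definitional)
lemma alt_eval (values : List Int) :
    bestShift_alt values
      = ((PySem.List.pyRange 1 256 1).foldl
          (fun best sc => if (scoresB (histB values)).getD sc 0 > (scoresB (histB values)).getD best 0 then sc else best) 0,
         (scoresB (histB values)).getD
          ((PySem.List.pyRange 1 256 1).foldl
            (fun best sc => if (scoresB (histB values)).getD sc 0 > (scoresB (histB values)).getD best 0 then sc else best) 0) 0) :=
  rfl

-- ===== VERDICT (by name: the statement is the Claim_ definition above) =====
theorem bestShift_spec : Claim_equal_bestShift := by
  intro values _
  unfold Spec_bestShift bestShift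
  rw [alt_eval]
  -- peel off shift 0 from A's loop: its score beats the initial -1
  rw [PySem.List.pyRange_one_cons (by norm_num : (0 : Int) < 256), List.foldl_cons]
  have h0 : scoreA values 0 > (0, (-1 : Int)).2 := by
    have h := scoreA_nonneg values 0
    show scoreA values 0 > -1
    omega
  rw [if_pos h0]
  rw [show (0:Int) + 1 = 1 from by norm_num]
  rw [fold_pair (scoreA values) (PySem.List.pyRange 1 256 1) 0]
  -- the two argmax folds coincide, and so do their scores at the common best shift
  have hrange : ∀ x ∈ PySem.List.pyRange 1 256 1, 0 ≤ x ∧ x < 256 := by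
    intro x hx
    have := (PySem.List.mem_pyRange_one).mp hx
    omega
  have hfold := fold_congr (scoreA values) (fun x => (scoresB (histB values)).getD x 0)
    (fun x hx0 hx1 => (score_eq values x hx0 hx1).symm)
    (PySem.List.pyRange 1 256 1) 0 hrange (by norm_num) (by norm_num)
  set bB := (PySem.List.pyRange 1 256 1).foldl
    (fun best sc => if (scoresB (histB values)).getD sc 0 > (scoresB (histB values)).getD best 0 then sc else best) 0
    with hbB
  have hbmem : 0 ≤ bB ∧ bB < 256 := by
    rcases fold_best_mem (fun x => (scoresB (histB values)).getD x 0) (PySem.List.pyRange 1 256 1) 0 with h | h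
    · rw [hbB, h]; norm_num
    · exact ⟨(hrange _ h).1, (hrange _ h).2⟩
  rw [hfold, score_eq values bB hbmem.1 hbmem.2]
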